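-- pv_equiv track=rewrite | github.com/meurig/AoC2023 | day15/day15.py | apply_seq
-- ===== SOURCE A (Python) =====
-- from collections import OrderedDict
--
-- def split_step(step: str) -> (str, int, str, int):
--     if '-' in step:
--         op_char = '-'
--         label = step[:-1]
--         focal_length = None
--     elif '=' in step:
--         op_char = '='
--         parts = step.split('=')
--         label = parts[0]
--         focal_length = int(parts[1])
--     else:
--         raise ValueError(f'no - or = found in step: {step}')
--     box_number = aoc_hash(label)
--     return label, box_number, op_char, focal_length
--
-- def apply_seq(init_seq: list[str]) -> list[OrderedDict[str, int]]:
--     lenses: list[OrderedDict[str, int]] = [OrderedDict() for _ in range(256) ]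
--     for step in init_seq:
--         label, box_number, op_char, focal_length = split_step(step)
--         if op_char == '=':
--             lenses[box_number][label] = focal_length
--         else:
--             if label in lenses[box_number]:
--                 lenses[box_number].pop(label)
--     return lenses
--
-- def aoc_hash(step: str) -> int:
--     current = 0
--     mult_factor = 17
--     div_factor = 256
--     for char in step:
--         current += ord(char)
--         current *= mult_factor
--         current = current % div_factor
--     return current
-- ===== SOURCE B (Python) =====
-- from collections import OrderedDict
--
-- def aoc_hash_b(label: str) -> int:
--     current = 0
--     for ch in label:
--         current = (current + ord(ch)) * 17 % 256
--     return current
--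
-- def apply_seq(init_seq: list) -> list:
--     # One global ordered table label -> focal length, distributed into the
--     # 256 boxes at the end (a label's box is determined by its hash, and the
--     # global insertion order restricted to one box is that box's order).
--     table = OrderedDict()
--     for step in init_seq:
--         if '-' in step:
--             table.pop(step[:-1], None)
--         else:
--             parts = step.split('=')
--             table[parts[0]] = int(parts[1])
--     return [OrderedDict(item for item in table.items() if aoc_hash_b(item[0]) == b)
--             for b in range(256)]
-- ===== Notes on version B (the rewrite author's own statement) =====
-- stated objective: alternative
-- what changed: B keeps one global insertion-ordered dict label->focal instead of A's bank of 256 per-box OrderedDicts, and distributes its entries into the 256 boxes by hash only after all steps are processed.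
import Mathlib
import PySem

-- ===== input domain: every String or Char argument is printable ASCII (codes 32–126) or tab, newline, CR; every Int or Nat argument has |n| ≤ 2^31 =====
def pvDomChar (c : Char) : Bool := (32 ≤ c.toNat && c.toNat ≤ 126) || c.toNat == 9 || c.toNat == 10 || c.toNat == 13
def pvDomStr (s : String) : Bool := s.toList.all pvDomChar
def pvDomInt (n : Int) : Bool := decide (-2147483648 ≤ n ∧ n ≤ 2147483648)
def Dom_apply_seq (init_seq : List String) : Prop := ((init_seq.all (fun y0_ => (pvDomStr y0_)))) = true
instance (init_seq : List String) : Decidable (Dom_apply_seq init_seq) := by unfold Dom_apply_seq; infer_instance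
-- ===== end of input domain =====

-- B replaces A's bank of 256 per-box OrderedDicts updated step by step with ONE global
-- ordered table label→focal (insert / overwrite in place / pop), distributed into the
-- 256 boxes only at the end; objective: alternative (different data structure).

-- ===== PORT A =====
-- aoc_hash
def pvAocHash (s : String) : Int :=
  s.toList.foldl (fun cur c => PySem.Int.mod ((cur + (c.toNat : Int)) * 17) 256) 0

-- split_step; none = ValueError (no '-'/'=' or failed int()), excluded by Pre_
def pvSplitStep (step : String) : Option (String × Int × String × Option Int) :=
  if PySem.Str.isIn "-" step then
    let label := PySem.Str.slice step none (some (-1))       -- step[:-1]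
    some (label, pvAocHash label, "-", none)
  else if PySem.Str.isIn "=" step then
    let parts := (PySem.Str.split? step "=").getD []          -- sep "=" ≠ "" so always some
    let label := (PySem.List.pyGet? parts 0).getD ""          -- parts[0]; parts is never []
    match PySem.Int.ofStr? ((PySem.List.pyGet? parts 1).getD "") with
    | some f => some (label, pvAocHash label, "=", some f)
    | none => none
  else none

-- body of A's for-loop
def pvStepA (lenses : List (PySem.Dict String Int)) (step : String) :
    List (PySem.Dict String Int) :=
  match pvSplitStep step with
  | none => lenses                                            -- Python raises here (outside Pre_)
  | some (label, box, op, focal?) =>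
    if op = "=" then
      PySem.List.pySetD lenses box
        ((PySem.List.pyGetD lenses box PySem.Dict.empty).insert label (focal?.getD 0))
    else
      let d := PySem.List.pyGetD lenses box PySem.Dict.empty
      if d.contains label then PySem.List.pySetD lenses box (d.erase label)  -- pop = erase (value unused)
      else lenses

def apply_seq (init_seq : List String) : List (List (String × Int)) :=
  (init_seq.foldl pvStepA (List.replicate 256 PySem.Dict.empty)).map PySem.Dict.items

-- ===== PORT B =====
def pvAocHashB (label : String) : Int :=
  label.toList.foldl (fun cur c => PySem.Int.mod ((cur + (c.toNat : Int)) * 17) 256) 0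

-- body of B's for-loop: one global table
def pvStepB (t : PySem.Dict String Int) (step : String) : PySem.Dict String Int :=
  if PySem.Str.isIn "-" step then
    t.erase (PySem.Str.slice step none (some (-1)))           -- table.pop(step[:-1], None)
  else
    let parts := (PySem.Str.split? step "=").getD []
    match PySem.Int.ofStr? ((PySem.List.pyGet? parts 1).getD "") with
    | some f => t.insert ((PySem.List.pyGet? parts 0).getD "") f
    | none => t                                               -- Python raises here (outside Pre_)

def apply_seq_alt (init_seq : List String) : List (List (String × Int)) :=
  let t := init_seq.foldl pvStepB PySem.Dict.empty
  (PySem.List.pyRange 0 256 1).map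
    (fun b => t.items.filter (fun p => pvAocHashB p.1 == b))

-- ===== PRECONDITION & SPEC =====
-- Pre_ excludes exactly the steps on which Python A raises ValueError: steps with
-- neither '-' nor '=', and '='-steps (without '-') whose segment between the first
-- two '='s is not int()-parsable.
def Pre_apply_seq (init_seq : List String) : Prop :=
  ∀ step ∈ init_seq,
    PySem.Str.isIn "-" step = true ∨
    (PySem.Str.isIn "=" step = true ∧
      (PySem.Int.ofStr?
        ((PySem.List.pyGet? ((PySem.Str.split? step "=").getD []) 1).getD "")).isSome = true)
instance (init_seq : List String) : Decidable (Pre_apply_seq init_seq) := by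
  unfold Pre_apply_seq; infer_instance

def pvWitness_apply_seq : List String := ["rn=1", "cm-", "qp=3", "rn-", "ot=7"]

def Spec_apply_seq (init_seq : List String) (out : List (List (String × Int))) : Prop := out = apply_seq_alt init_seq
instance (init_seq : List String) (out : List (List (String × Int))) : Decidable (Spec_apply_seq init_seq out) := by unfold Spec_apply_seq; infer_instance

-- ===== CLAIM (what is proved, stated in full; the proofs are below) =====
def Claim_equal_apply_seq : Prop := ∀ (init_seq : List String), Dom_apply_seq init_seq → Pre_apply_seq init_seq → Spec_apply_seq init_seq (apply_seq init_seq)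

-- ===== LEMMAS AND PROOFS =====

-- the bank of 256 boxes determined by the global table: box b holds the items hashing to b
def pvBoxesOf (t : PySem.Dict String Int) : List (PySem.Dict String Int) :=
  (List.range 256).map
    (fun (b : Nat) => PySem.Dict.mk (t.items.filter (fun p => pvAocHash p.1 == (b : Int))))

theorem pvAocHash_aux (l : List Char) (a : Int) (h0 : 0 ≤ a) (h1 : a < 256) :
    0 ≤ l.foldl (fun cur c => PySem.Int.mod ((cur + (c.toNat : Int)) * 17) 256) a ∧
    l.foldl (fun cur c => PySem.Int.mod ((cur + (c.toNat : Int)) * 17) 256) a < 256 := by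
  induction l generalizing a with
  | nil => exact ⟨h0, h1⟩
  | cons c l ih =>
    simp only [List.foldl_cons]
    exact ih _ (PySem.Int.mod_nonneg _ (by norm_num)) (PySem.Int.mod_lt _ (by norm_num))

theorem pvAocHash_bounds (s : String) : 0 ≤ pvAocHash s ∧ pvAocHash s < 256 :=
  pvAocHash_aux s.toList 0 (by norm_num) (by norm_num)

set_option maxRecDepth 2000 in
theorem pvBoxesOf_empty : pvBoxesOf PySem.Dict.empty = List.replicate 256 PySem.Dict.empty := by
  rw [pvBoxesOf]
  rw [show (PySem.Dict.empty : PySem.Dict String Int).items = [] from rfl]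
  simp only [List.filter_nil]
  rw [List.map_const']
  rfl

theorem filt_any (l : List (String × Int)) (label : String) :
    ((l.filter (fun p => pvAocHash p.1 == pvAocHash label)).any (fun p => p.1 == label))
      = l.any (fun p => p.1 == label) := by
  rw [List.any_filter]
  apply PySem.List.any_congr_mem
  intro x hx
  by_cases h : x.1 = label
  · simp [h]
  · simp [h]

-- contains transfer
theorem contains_filt (t : PySem.Dict String Int) (label : String) :
    (PySem.Dict.mk (t.items.filter (fun p => pvAocHash p.1 == pvAocHash label))).contains label
      = t.contains label := by
  simp only [PySem.Dict.contains]
  exact filt_any t.items label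

theorem ins_self (t : PySem.Dict String Int) (label : String) (v : Int) :
    ((t.insert label v).items).filter (fun p => pvAocHash p.1 == pvAocHash label)
      = ((PySem.Dict.mk (t.items.filter (fun p => pvAocHash p.1 == pvAocHash label))).insert label v).items := by
  by_cases hc : t.contains label
  · rw [PySem.Dict.items_insert_of_contains _ _ hc,
        PySem.Dict.items_insert_of_contains _ _ (by rw [contains_filt]; exact hc)]
    rw [List.filter_map]
    congr 1
    apply List.filter_congr
    intro x hx
    by_cases h : x.1 = label
    · simp [h]
    · simp [h]
  · rw [PySem.Dict.items_insert_of_not_contains _ _ (by simpa using hc),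
        PySem.Dict.items_insert_of_not_contains _ _ (by rw [contains_filt]; simpa using hc)]
    rw [List.filter_append]
    simp

theorem ins_other (t : PySem.Dict String Int) (label : String) (v : Int) (b : Int)
    (hb : b ≠ pvAocHash label) :
    ((t.insert label v).items).filter (fun p => pvAocHash p.1 == b)
      = t.items.filter (fun p => pvAocHash p.1 == b) := by
  by_cases hc : t.contains label
  · rw [PySem.Dict.items_insert_of_contains _ _ hc, List.filter_map]
    rw [List.filter_congr (q := fun p => pvAocHash p.1 == b) ?_]
    · rw [List.map_congr_left (g := id) ?_, List.map_id]
      intro x hx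
      show _ = x
      rw [List.mem_filter] at hx
      have : ¬ (x.1 = label) := by
        intro h; rw [h] at hx; simp [(Ne.symm hb)] at hx
      simp [this]
    · intro x hx
      by_cases h : x.1 = label
      · simp [h]
      · simp [h]
  · rw [PySem.Dict.items_insert_of_not_contains _ _ (by simpa using hc), List.filter_append]
    simp [Ne.symm hb]

theorem erase_self (t : PySem.Dict String Int) (label : String) :
    ((t.erase label).items).filter (fun p => pvAocHash p.1 == pvAocHash label)
      = ((PySem.Dict.mk (t.items.filter (fun p => pvAocHash p.1 == pvAocHash label))).erase label).items := by
  simp only [PySem.Dict.erase, List.filter_filter]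
  apply List.filter_congr
  intro x hx
  exact Bool.and_comm _ _

theorem erase_other (t : PySem.Dict String Int) (label : String) (b : Int)
    (hb : b ≠ pvAocHash label) :
    ((t.erase label).items).filter (fun p => pvAocHash p.1 == b)
      = t.items.filter (fun p => pvAocHash p.1 == b) := by
  simp only [PySem.Dict.erase, List.filter_filter]
  apply List.filter_congr
  intro x hx
  by_cases h : x.1 = label
  · simp [h, Ne.symm hb]
  · simp [h]

theorem erase_not_contains (t : PySem.Dict String Int) (label : String)
    (hc : t.contains label = false) : t.erase label = t := by
  simp only [PySem.Dict.erase]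
  congr 1
  apply List.filter_eq_self.mpr
  intro p hp
  rw [PySem.Dict.contains, List.any_eq_false] at hc
  simpa using hc p hp

theorem boxes_length (t : PySem.Dict String Int) : (pvBoxesOf t).length = 256 := by
  rw [pvBoxesOf, List.length_map, List.length_range]

theorem boxes_getElem (t : PySem.Dict String Int) (b : Nat) (hb : b < 256) :
    (pvBoxesOf t)[b]'(by rw [boxes_length]; exact hb)
      = PySem.Dict.mk (t.items.filter (fun p => pvAocHash p.1 == (b : Int))) := by
  simp only [pvBoxesOf, List.getElem_map, List.getElem_range]

theorem boxes_pyGetD (t : PySem.Dict String Int) (i : Int) (h0 : 0 ≤ i) (h1 : i < 256) :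
    PySem.List.pyGetD (pvBoxesOf t) i PySem.Dict.empty
      = PySem.Dict.mk (t.items.filter (fun p => pvAocHash p.1 == i)) := by
  rw [PySem.List.pyGetD_eq_getElem _ _ h0 (by rw [boxes_length]; exact_mod_cast h1)]
  rw [boxes_getElem t i.toNat (by omega)]
  rw [Int.toNat_of_nonneg h0]

theorem pvStep_commute (t : PySem.Dict String Int) (s : String)
    (hs : PySem.Str.isIn "-" s = true ∨
      (PySem.Str.isIn "=" s = true ∧
        (PySem.Int.ofStr?
          ((PySem.List.pyGet? ((PySem.Str.split? s "=").getD []) 1).getD "")).isSome = true)) :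
    pvStepA (pvBoxesOf t) s = pvBoxesOf (pvStepB t s) := by
  by_cases hminus : PySem.Str.isIn "-" s = true
  · have hsplit : pvSplitStep s
        = some (PySem.Str.slice s none (some (-1)),
            pvAocHash (PySem.Str.slice s none (some (-1))), "-", none) := by
      rw [pvSplitStep, if_pos hminus]
    set L := PySem.Str.slice s none (some (-1)) with hL
    have hb := pvAocHash_bounds L
    rw [pvStepA, hsplit]
    simp only [if_neg (by decide : ¬ ("-" = "="))]
    rw [pvStepB, if_pos hminus, ← hL]
    rw [boxes_pyGetD t _ hb.1 hb.2, contains_filt]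
    by_cases hc : t.contains L = true
    · rw [if_pos hc, PySem.List.pySetD_of_nonneg _ _ hb.1]
      apply List.ext_getElem
      · rw [List.length_set, boxes_length, boxes_length]
      intro b hb1 hb2
      rw [List.getElem_set]
      rw [List.length_set, boxes_length] at hb1
      by_cases hbe : (pvAocHash L).toNat = b
      · rw [if_pos hbe, boxes_getElem _ b hb1]
        have hcast : (b : Int) = pvAocHash L := by omega
        rw [hcast]
        apply PySem.Dict.ext
        exact (erase_self t L).symm
      · rw [if_neg hbe, boxes_getElem _ b hb1, boxes_getElem _ b hb1]
        congr 1
        exact (erase_other t L b (by omega)).symm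
    · rw [if_neg hc, erase_not_contains t L (by simpa using hc)]
  · rcases hs with h | ⟨heq, hsome⟩
    · exact absurd h hminus
    rw [Bool.not_eq_true] at hminus
    obtain ⟨f, hf⟩ := Option.isSome_iff_exists.mp hsome
    have hsplit : pvSplitStep s
        = some ((PySem.List.pyGet? ((PySem.Str.split? s "=").getD []) 0).getD "",
            pvAocHash ((PySem.List.pyGet? ((PySem.Str.split? s "=").getD []) 0).getD ""), "=", some f) := by
      rw [pvSplitStep, if_neg (by rw [hminus]; decide), if_pos heq]
      simp only [hf]
    set L := (PySem.List.pyGet? ((PySem.Str.split? s "=").getD []) 0).getD "" with hL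
    have hb := pvAocHash_bounds L
    have hA : pvStepA (pvBoxesOf t) s
        = PySem.List.pySetD (pvBoxesOf t) (pvAocHash L)
            ((PySem.List.pyGetD (pvBoxesOf t) (pvAocHash L) PySem.Dict.empty).insert L f) := by
      rw [pvStepA, hsplit]
      rfl
    have hcond : ¬ (PySem.Str.isIn "-" s = true) := by rw [hminus]; decide
    have hB : pvStepB t s = t.insert L f := by
      rw [pvStepB, if_neg hcond]
      simp only [hf, ← hL]
    rw [hA, hB]
    rw [boxes_pyGetD t _ hb.1 hb.2]
    rw [PySem.List.pySetD_of_nonneg _ _ hb.1]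
    apply List.ext_getElem
    · rw [List.length_set, boxes_length, boxes_length]
    intro b hb1 hb2
    rw [List.getElem_set]
    rw [List.length_set, boxes_length] at hb1
    by_cases hbe : (pvAocHash L).toNat = b
    · rw [if_pos hbe, boxes_getElem _ b hb1]
      have hcast : (b : Int) = pvAocHash L := by omega
      rw [hcast]
      apply PySem.Dict.ext
      exact (ins_self t L f).symm
    · rw [if_neg hbe, boxes_getElem _ b hb1, boxes_getElem _ b hb1]
      congr 1
      exact (ins_other t L f b (by omega)).symm

theorem pvFold_commute (l : List String) (t : PySem.Dict String Int)
    (h : ∀ s ∈ l, PySem.Str.isIn "-" s = true ∨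
      (PySem.Str.isIn "=" s = true ∧
        (PySem.Int.ofStr?
          ((PySem.List.pyGet? ((PySem.Str.split? s "=").getD []) 1).getD "")).isSome = true)) :
    l.foldl pvStepA (pvBoxesOf t) = pvBoxesOf (l.foldl pvStepB t) := by
  induction l generalizing t with
  | nil => rfl
  | cons a l ih =>
    simp only [List.foldl_cons]
    rw [pvStep_commute t a (h a (by simp))]
    exact ih _ (fun s hs => h s (by simp [hs]))

-- ===== VERDICT (by name: the statement is the Claim_ definition above) =====
theorem apply_seq_spec : Claim_equal_apply_seq := by
  intro l _ hpre
  unfold Spec_apply_seq apply_seq apply_seq_alt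
  rw [← pvBoxesOf_empty, pvFold_commute l PySem.Dict.empty hpre]
  rw [pvBoxesOf, List.map_map, PySem.List.pyRange_one, List.map_map]
  norm_num
  apply List.map_congr_left
  intro b hb
  simp only [Function.comp]
  rfl
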